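-- pv_equiv track=rewrite | github.com/HidenLee/BaekjoonHub | 프로그래머스/2/150368. 이모티콘 할인행사/이모티콘 할인행사.py | solution
-- ===== SOURCE A (Python) =====
-- def solution(users, emoticons):
--     from itertools import product
--     n = len(users)
--     m = len(emoticons)
--     ref = {0:10,1:20,2:30,3:40}
--     answer = [0,0]
--     for case in list(product(range(4),repeat=m)):
--         total = 0
--         subscribe = 0
--         for rate,maxV in users:
--             sumV = sum([(100-ref[case[idx]])*emoji//100 for idx, emoji in enumerate(emoticons) if rate <= ref[case[idx]]])
--             if sumV >= maxV:
--                 subscribe += 1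
--             else:
--                 total += sumV
--
--         if answer[0] < subscribe:
--             answer[0] = subscribe
--             answer[1] = total
--         elif answer[0] == subscribe:
--             answer[1] = max(answer[1],total)
--
--
--
--
--     return answer
-- ===== SOURCE B (Python) =====
-- def solution(users, emoticons):
--     m = len(emoticons)
--     best = [0, 0]
--
--     def dfs(i, state):
--         # state: (rate, maxV, accumulated spend) per user, built up one emoticon at a time
--         if i == m:
--             subscribe = 0
--             total = 0
--             for _, maxv, s in state:
--                 if s >= maxv:
--                     subscribe += 1
--                 else:
--                     total += s
--             if best[0] < subscribe:
--                 best[0] = subscribe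
--                 best[1] = total
--             elif best[0] == subscribe:
--                 best[1] = max(best[1], total)
--             return
--         e = emoticons[i]
--         for d in (10, 20, 30, 40):
--             dfs(i + 1, [(r, mx, s + (100 - d) * e // 100) if r <= d else (r, mx, s)
--                         for r, mx, s in state])
--
--     dfs(0, [(r, mx, 0) for r, mx in users])
--     return best
-- ===== Notes on version B (the rewrite author's own statement) =====
-- stated objective: alternative
-- what changed: Replaces itertools.product over all 4^m complete assignments (re-scanning every emoticon per user at each case) with a recursive DFS over the emoticons that carries each user's accumulated spend incrementally, so the leaf only compares accumulated sums.
import Mathlib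
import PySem

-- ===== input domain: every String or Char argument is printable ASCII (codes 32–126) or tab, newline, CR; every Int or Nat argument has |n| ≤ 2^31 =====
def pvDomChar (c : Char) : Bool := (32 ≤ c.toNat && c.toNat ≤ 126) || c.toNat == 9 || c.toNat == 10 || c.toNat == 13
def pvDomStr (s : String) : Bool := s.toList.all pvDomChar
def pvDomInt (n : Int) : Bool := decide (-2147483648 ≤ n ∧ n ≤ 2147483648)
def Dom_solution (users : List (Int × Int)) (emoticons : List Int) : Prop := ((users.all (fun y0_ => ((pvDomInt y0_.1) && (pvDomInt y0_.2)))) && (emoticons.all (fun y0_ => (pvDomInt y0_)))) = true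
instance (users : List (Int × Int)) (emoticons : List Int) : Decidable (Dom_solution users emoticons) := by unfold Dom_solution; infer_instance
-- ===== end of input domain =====

-- B replaces itertools.product over all 4^m full assignments with a DFS over the emoticons that
-- carries each user's spend incrementally, so a leaf evaluation no longer rescans the emoticons.

-- ===== PORT A =====
-- ref = {0:10,1:20,2:30,3:40}
def pvRef : PySem.Dict Int Int := PySem.Dict.ofList [(0, 10), (1, 20), (2, 30), (3, 40)]

-- list(product(range(4), repeat=m)), in itertools' order (first coordinate outermost)
def pvProd : Nat → List (List Int)
  | 0 => [[]]
  | k + 1 => ([0, 1, 2, 3] : List Int).flatMap (fun d => (pvProd k).map (fun c => d :: c))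

-- sum([(100-ref[case[idx]])*emoji//100 for idx, emoji in enumerate(emoticons) if rate <= ref[case[idx]]])
-- case[idx] is exact via pyGetD: enumerate yields 0 ≤ idx < len(emoticons) = len(case) for every case used.
def pvSumV (rate : Int) (c : List Int) (emoticons : List Int) : Int :=
  (((PySem.List.enumerate emoticons).filter
      (fun p => rate ≤ PySem.Dict.getD pvRef (PySem.List.pyGetD c p.1 0) 0)).map
    (fun p => PySem.Int.floordiv ((100 - PySem.Dict.getD pvRef (PySem.List.pyGetD c p.1 0) 0) * p.2) 100)).sum

-- answer is a two-cell list; ported as a pair (answer[0], answer[1]) and rebuilt at the end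
def solution (users : List (Int × Int)) (emoticons : List Int) : List Int :=
  let m := emoticons.length
  let answer :=
    (pvProd m).foldl
      (fun (answer : Int × Int) c =>
        -- inner loop over users, accumulating (total, subscribe)
        let r := users.foldl
            (fun (acc : Int × Int) u =>
              let sumV := pvSumV u.1 c emoticons
              if sumV ≥ u.2 then (acc.1, acc.2 + 1) else (acc.1 + sumV, acc.2))
            (0, 0)
        if answer.1 < r.2 then (r.2, r.1)
        else if answer.1 = r.2 then (answer.1, max answer.2 r.1)
        else answer)
      (0, 0)
  [answer.1, answer.2]

-- ===== PORT B =====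
-- one DFS step: add emoticon e at discount d to every user's running spend
def pvAdd (d e : Int) (st : List (Int × Int × Int)) : List (Int × Int × Int) :=
  st.map (fun t => if t.1 ≤ d then (t.1, t.2.1, t.2.2 + PySem.Int.floordiv ((100 - d) * e) 100) else t)

-- leaf: count subscribers / sum totals over the accumulated state
def pvEval (st : List (Int × Int × Int)) : Int × Int :=
  st.foldl (fun acc t => if t.2.2 ≥ t.2.1 then (acc.1 + 1, acc.2) else (acc.1, acc.2 + t.2.2)) (0, 0)

-- best-update, exactly Source B's strict-greater / max-on-tie rule
def pvUpd (best p : Int × Int) : Int × Int :=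
  if best.1 < p.1 then p else if best.1 = p.1 then (best.1, max best.2 p.2) else best

def pvDfs : List Int → List (Int × Int × Int) → Int × Int → Int × Int
  | [], st, best => pvUpd best (pvEval st)
  | e :: rest, st, best =>
      ([10, 20, 30, 40] : List Int).foldl (fun b d => pvDfs rest (pvAdd d e st) b) best

def solution_alt (users : List (Int × Int)) (emoticons : List Int) : List Int :=
  let r := pvDfs emoticons (users.map (fun u => (u.1, u.2, 0))) (0, 0)
  [r.1, r.2]

-- ===== PRECONDITION & SPEC =====
def Spec_solution (users : List (Int × Int)) (emoticons : List Int) (out : List Int) : Prop := out = solution_alt users emoticons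
instance (users : List (Int × Int)) (emoticons : List Int) (out : List Int) : Decidable (Spec_solution users emoticons out) := by unfold Spec_solution; infer_instance

-- ===== CLAIM (what is proved, stated in full; the proofs are below) =====
def Claim_equal_solution : Prop := ∀ (users : List (Int × Int)) (emoticons : List Int), Dom_solution users emoticons → Spec_solution users emoticons (solution users emoticons)

-- ===== LEMMAS AND PROOFS =====

def pvRefv (x : Int) : Int := PySem.Dict.getD pvRef x 0

def pvContrib (rate d e : Int) : Int :=
  if rate ≤ d then PySem.Int.floordiv ((100 - d) * e) 100 else 0

def pvSumZ (rate : Int) (vs em : List Int) : Int :=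
  ((vs.zip em).map (fun p => pvContrib rate p.1 p.2)).sum

-- value-level product list (over the four discount values)
def pvProdV : Nat → List (List Int)
  | 0 => [[]]
  | k + 1 => ([10, 20, 30, 40] : List Int).flatMap (fun d => (pvProdV k).map (fun c => d :: c))

def pvAddAll : List Int → List Int → List (Int × Int × Int) → List (Int × Int × Int)
  | [], _, st => st
  | _ :: _, [], st => st
  | d :: vs, e :: em, st => pvAddAll vs em (pvAdd d e st)

theorem pvProd_length : ∀ (m : Nat) (c : List Int), c ∈ pvProd m → c.length = m := by
  intro m
  induction m with
  | zero => intro c hc; simp [pvProd] at hc; simp [hc]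
  | succ k ih =>
    intro c hc
    simp only [pvProd, List.mem_flatMap, List.mem_map] at hc
    obtain ⟨d, _, c', hc', rfl⟩ := hc
    simp [ih c' hc']

theorem pvProdV_eq_map (m : Nat) : pvProdV m = (pvProd m).map (List.map pvRefv) := by
  induction m with
  | zero => simp [pvProd, pvProdV]
  | succ k ih =>
    simp only [pvProd, pvProdV, ih, List.map_flatMap, List.map_map]
    have h0 : pvRefv 0 = 10 := by decide
    have h1 : pvRefv 1 = 20 := by decide
    have h2 : pvRefv 2 = 30 := by decide
    have h3 : pvRefv 3 = 40 := by decide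
    simp [List.flatMap_cons, Function.comp_def, h0, h1, h2, h3]

theorem foldl_flatMap {α β γ : Type} (g : α → List β) (f : γ → β → γ) :
    ∀ (xs : List α) (init : γ),
      (xs.flatMap g).foldl f init = xs.foldl (fun b x => (g x).foldl f b) init := by
  intro xs
  induction xs with
  | nil => intro init; simp
  | cons x xs ih => intro init; simp [List.flatMap_cons, List.foldl_append, ih]

theorem pvSumV_eq_sumZ (rate : Int) :
    ∀ (em : List Int) (s : Nat) (c : List Int), s + em.length ≤ c.length →
      (((PySem.List.enumerate em (s : Int)).filter
          (fun p => rate ≤ pvRefv (PySem.List.pyGetD c p.1 0))).map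
        (fun p => PySem.Int.floordiv ((100 - pvRefv (PySem.List.pyGetD c p.1 0)) * p.2) 100)).sum
      = pvSumZ rate ((c.drop s).map pvRefv) em := by
  intro em
  induction em with
  | nil => intro s c _; simp [pvSumZ]
  | cons e em ih =>
    intro s c hlen
    have hs : s < c.length := by simp at hlen; omega
    have hget : PySem.List.pyGetD c (s : Int) 0 = c.getD s 0 := by simp
    have ihs := ih (s + 1) c (by simp at hlen ⊢; omega)
    have hnext : ((s : Int) + 1) = ((s + 1 : Nat) : Int) := by push_cast; ring
    have hdrop : c.drop s = c.getD s 0 :: c.drop (s + 1) := by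
      rw [List.drop_eq_getElem_cons hs, List.getD_eq_getElem c 0 hs]
    rw [PySem.List.enumerate_cons, hnext, hdrop]
    simp only [List.map_cons, pvSumZ, List.zip_cons_cons, List.sum_cons, List.filter_cons, hget]
    by_cases hr : rate ≤ pvRefv (c.getD s 0)
    · rw [if_pos (by simpa using hr), List.map_cons, List.sum_cons, ihs]
      simp only [pvSumZ, pvContrib, if_pos hr, hget]
    · rw [if_neg (by simpa using hr), ihs]
      simp only [pvSumZ, pvContrib, if_neg hr]
      ring

theorem pvAdd_eq (d e : Int) (st : List (Int × Int × Int)) :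
    pvAdd d e st = st.map (fun t => (t.1, t.2.1, t.2.2 + pvContrib t.1 d e)) := by
  unfold pvAdd
  apply List.map_congr_left
  intro t _
  by_cases h : t.1 ≤ d <;> simp [pvContrib, h]

theorem pvAddAll_eq :
    ∀ (vs em : List Int) (st : List (Int × Int × Int)), vs.length = em.length →
      pvAddAll vs em st = st.map (fun t => (t.1, t.2.1, t.2.2 + pvSumZ t.1 vs em)) := by
  intro vs
  induction vs with
  | nil =>
    intro em st h
    simp [pvAddAll, pvSumZ]
  | cons d vs ih =>
    intro em st h
    cases em with
    | nil => simp at h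
    | cons e em =>
      simp only [pvAddAll, pvAdd_eq]
      rw [ih em _ (by simpa using h)]
      simp only [List.map_map]
      apply List.map_congr_left
      intro t _
      simp [Function.comp, pvSumZ, pvContrib]
      ring

theorem pvEval_map (S : Int × Int → Int) :
    ∀ (users : List (Int × Int)) (a b : Int),
      ((users.map (fun u => (u.1, u.2, S u))).foldl
          (fun acc t => if t.2.2 ≥ t.2.1 then (acc.1 + 1, acc.2) else (acc.1, acc.2 + t.2.2)) (a, b))
      = (fun r => (r.2, r.1))
          (users.foldl (fun acc u => if S u ≥ u.2 then (acc.1, acc.2 + 1) else (acc.1 + S u, acc.2)) (b, a)) := by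
  intro users
  induction users with
  | nil => intro a b; simp
  | cons u us ih =>
    intro a b
    by_cases h : S u ≥ u.2 <;> simp [h, ih]

theorem pvDfs_eq :
    ∀ (em : List Int) (st : List (Int × Int × Int)) (best : Int × Int),
      pvDfs em st best
        = (pvProdV em.length).foldl (fun b vs => pvUpd b (pvEval (pvAddAll vs em st))) best := by
  intro em
  induction em with
  | nil => intro st best; simp [pvDfs, pvProdV, pvAddAll]
  | cons e em ih =>
    intro st best
    simp only [pvDfs, List.length_cons, pvProdV, foldl_flatMap, List.foldl_map]
    simp only [ih]
    rfl

theorem solution_eq_alt (users : List (Int × Int)) (emoticons : List Int) :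
    solution users emoticons = solution_alt users emoticons := by
  unfold solution solution_alt
  rw [pvDfs_eq]
  rw [pvProdV_eq_map, List.foldl_map]
  refine congrArg (fun r : Int × Int => [r.1, r.2]) (PySem.List.foldl_congr_mem _ _ _ _ ?_)
  intro b c hc
  have hlen : c.length = emoticons.length := pvProd_length _ c hc
  -- rewrite A's per-user sum into B's accumulated sum
  have hsum : ∀ rate : Int, pvSumV rate c emoticons = pvSumZ rate (c.map pvRefv) emoticons := by
    intro rate
    have h := pvSumV_eq_sumZ rate emoticons 0 c (by omega)
    simpa [pvSumV, pvRefv] using h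
  have haddall : pvAddAll (c.map pvRefv) emoticons (users.map (fun u => (u.1, u.2, 0)))
      = users.map (fun u => (u.1, u.2, pvSumV u.1 c emoticons)) := by
    rw [pvAddAll_eq _ _ _ (by simp [hlen]), List.map_map]
    apply List.map_congr_left
    intro u _
    simp [Function.comp, hsum]
  rw [haddall]
  unfold pvEval
  rw [pvEval_map (fun u => pvSumV u.1 c emoticons) users 0 0]
  unfold pvUpd
  rcases users.foldl _ ((0 : Int), (0 : Int)) with ⟨tot, sub⟩
  by_cases h1 : b.1 < sub <;> by_cases h2 : b.1 = sub <;> simp [h1, h2]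

-- ===== VERDICT (by name: the statement is the Claim_ definition above) =====
theorem solution_spec : Claim_equal_solution := by
  intro users emoticons _
  unfold Spec_solution
  exact solution_eq_alt users emoticons
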